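-- pv_equiv track=rewrite | github.com/denikryt/PeerTube-browser | dev/workflow_lib/feature_commands.py | _summarize_materialized_issue_actions
-- ===== SOURCE A (Python) =====
-- from typing import Any
--
-- def _summarize_materialized_issue_actions(materialized_issues: list[dict[str, Any]]) -> dict[str, int]:
--     """Return deterministic action counters for materialize issue results."""
--     summary = {
--         "total": len(materialized_issues),
--         "created": 0,
--         "updated": 0,
--         "skipped": 0,
--         "would_create": 0,
--         "would_update": 0,
--         "would_skip": 0,
--     }
--     action_to_key = {
--         "created": "created",
--         "updated": "updated",
--         "skipped": "skipped",
--         "would-create": "would_create",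
--         "would-update": "would_update",
--         "would-skip": "would_skip",
--     }
--     for item in materialized_issues:
--         action = str(item.get("action", "")).strip()
--         key = action_to_key.get(action)
--         if key is not None:
--             summary[key] += 1
--     return summary
-- ===== SOURCE B (Python) =====
-- def _summarize_materialized_issue_actions(materialized_issues):
--     actions = [str(item.get("action", "")).strip() for item in materialized_issues]
--     keys = [("created", "created"), ("updated", "updated"), ("skipped", "skipped"),
--             ("would_create", "would-create"), ("would_update", "would-update"),
--             ("would_skip", "would-skip")]
--     summary = {"total": len(actions)}
--     for out_key, raw in keys:
--         summary[out_key] = actions.count(raw)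
--     return summary
-- ===== Notes on version B (the rewrite author's own statement) =====
-- stated objective: simpler
-- what changed: B normalizes all action strings into a list once and then computes each output counter by an independent list.count scan over that list (one scan per fixed key), instead of A's single pass with a mapping table and selective in-place dict increments; no tally dict or mapping lookup exists in B.
import Mathlib
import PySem

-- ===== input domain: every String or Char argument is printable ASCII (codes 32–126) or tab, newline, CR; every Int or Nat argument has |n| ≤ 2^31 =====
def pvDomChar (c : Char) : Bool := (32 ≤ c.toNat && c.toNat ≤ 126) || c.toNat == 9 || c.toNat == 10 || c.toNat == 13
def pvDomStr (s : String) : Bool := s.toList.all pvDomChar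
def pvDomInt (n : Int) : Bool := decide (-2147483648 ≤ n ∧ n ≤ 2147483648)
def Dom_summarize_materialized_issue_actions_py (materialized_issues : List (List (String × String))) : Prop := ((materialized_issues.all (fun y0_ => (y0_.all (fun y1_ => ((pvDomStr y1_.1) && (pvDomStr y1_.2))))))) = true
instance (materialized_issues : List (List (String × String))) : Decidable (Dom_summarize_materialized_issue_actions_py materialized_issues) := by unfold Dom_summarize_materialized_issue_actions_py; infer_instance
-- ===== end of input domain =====

-- B normalizes the actions into a list once, then fills each fixed output key by an
-- independent list.count scan — no tally dict, no mapping lookup (simpler decomposition, same cost).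

-- ===== PORT A =====
def summarize_materialized_issue_actions_py (materialized_issues : List (List (String × String))) : List (String × Int) :=
  let summary : PySem.Dict String Int := PySem.Dict.mk
    [("total", (materialized_issues.length : Int)), ("created", 0), ("updated", 0),
     ("skipped", 0), ("would_create", 0), ("would_update", 0), ("would_skip", 0)]
  let action_to_key : PySem.Dict String String := PySem.Dict.mk
    [("created", "created"), ("updated", "updated"), ("skipped", "skipped"),
     ("would-create", "would_create"), ("would-update", "would_update"), ("would-skip", "would_skip")]
  let summary := materialized_issues.foldl (fun s item =>
    let action := PySem.Str.strip ((PySem.Dict.mk item).getD "action" "")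
    match action_to_key.get? action with
    | some key => s.modify key 0 (· + 1)
    | none => s) summary
  summary.items

-- ===== PORT B =====
def summarize_materialized_issue_actions_py_alt (materialized_issues : List (List (String × String))) : List (String × Int) :=
  let actions : List String :=
    materialized_issues.map (fun item => PySem.Str.strip ((PySem.Dict.mk item).getD "action" ""))
  let keys : List (String × String) :=
    [("created", "created"), ("updated", "updated"), ("skipped", "skipped"),
     ("would_create", "would-create"), ("would_update", "would-update"),
     ("would_skip", "would-skip")]
  let summary : PySem.Dict String Int := PySem.Dict.mk [("total", (actions.length : Int))]
  let summary := keys.foldl (fun s kr => s.insert kr.1 (PySem.List.count actions kr.2)) summary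
  summary.items

-- ===== PRECONDITION & SPEC =====
def Spec_summarize_materialized_issue_actions_py (materialized_issues : List (List (String × String))) (out : List (String × Int)) : Prop := out = summarize_materialized_issue_actions_py_alt materialized_issues
instance (materialized_issues : List (List (String × String))) (out : List (String × Int)) : Decidable (Spec_summarize_materialized_issue_actions_py materialized_issues out) := by unfold Spec_summarize_materialized_issue_actions_py; infer_instance

-- ===== CLAIM (what is proved, stated in full; the proofs are below) =====
def Claim_equal_summarize_materialized_issue_actions_py : Prop := ∀ (materialized_issues : List (List (String × String))), Dom_summarize_materialized_issue_actions_py materialized_issues → Spec_summarize_materialized_issue_actions_py materialized_issues (summarize_materialized_issue_actions_py materialized_issues)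

-- ===== LEMMAS AND PROOFS =====

-- the normalized action string of one item
def pvAct (item : List (String × String)) : String :=
  PySem.Str.strip ((PySem.Dict.mk item).getD "action" "")

-- A's loop body, named (definitionally equal to the lambda inside the port)
def pvStepA (s : PySem.Dict String Int) (item : List (String × String)) : PySem.Dict String Int :=
  let action := pvAct item
  match (PySem.Dict.mk
    [("created", "created"), ("updated", "updated"), ("skipped", "skipped"),
     ("would-create", "would_create"), ("would-update", "would_update"), ("would-skip", "would_skip")]
    : PySem.Dict String String).get? action with
  | some key => s.modify key 0 (· + 1)
  | none => s

theorem pvPortA_eq (mi : List (List (String × String))) :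
    summarize_materialized_issue_actions_py mi
      = (List.foldl pvStepA
          (PySem.Dict.mk [("total", (mi.length : Int)), ("created", 0), ("updated", 0),
            ("skipped", 0), ("would_create", 0), ("would_update", 0), ("would_skip", 0)]) mi).items := rfl

theorem pvStepA_eq (x : List (String × String)) (t a b c d e f : Int) :
    pvStepA (PySem.Dict.mk [("total", t), ("created", a), ("updated", b), ("skipped", c),
      ("would_create", d), ("would_update", e), ("would_skip", f)]) x
    = PySem.Dict.mk [("total", t),
        ("created", if pvAct x = "created" then a + 1 else a),
        ("updated", if pvAct x = "updated" then b + 1 else b),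
        ("skipped", if pvAct x = "skipped" then c + 1 else c),
        ("would_create", if pvAct x = "would-create" then d + 1 else d),
        ("would_update", if pvAct x = "would-update" then e + 1 else e),
        ("would_skip", if pvAct x = "would-skip" then f + 1 else f)] := by
  by_cases h1 : pvAct x = "created"
  · simp [pvStepA, h1, PySem.Dict.get?, PySem.Dict.modify, PySem.Dict.getD, PySem.Dict.insert]
  · by_cases h2 : pvAct x = "updated"
    · simp [pvStepA, h2, PySem.Dict.get?, PySem.Dict.modify, PySem.Dict.getD, PySem.Dict.insert]
    · by_cases h3 : pvAct x = "skipped"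
      · simp [pvStepA, h3, PySem.Dict.get?, PySem.Dict.modify, PySem.Dict.getD, PySem.Dict.insert]
      · by_cases h4 : pvAct x = "would-create"
        · simp [pvStepA, h4, PySem.Dict.get?, PySem.Dict.modify, PySem.Dict.getD, PySem.Dict.insert]
        · by_cases h5 : pvAct x = "would-update"
          · simp [pvStepA, h5, PySem.Dict.get?, PySem.Dict.modify, PySem.Dict.getD, PySem.Dict.insert]
          · by_cases h6 : pvAct x = "would-skip"
            · simp [pvStepA, h6, PySem.Dict.get?, PySem.Dict.modify, PySem.Dict.getD, PySem.Dict.insert]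
            · simp [pvStepA, PySem.Dict.get?,
                Ne.symm h1, Ne.symm h2, Ne.symm h3, Ne.symm h4, Ne.symm h5, Ne.symm h6]
              exact ⟨h1, h2, h3, h4, h5, h6⟩

-- A's whole fold, characterized by counts of the normalized actions
theorem pvFoldA (l : List (List (String × String))) (t a b c d e f : Int) :
    (List.foldl pvStepA
      (PySem.Dict.mk [("total", t), ("created", a), ("updated", b), ("skipped", c),
        ("would_create", d), ("would_update", e), ("would_skip", f)]) l).items
    = [("total", t),
       ("created", a + ((l.map pvAct).count "created" : Int)),
       ("updated", b + ((l.map pvAct).count "updated" : Int)),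
       ("skipped", c + ((l.map pvAct).count "skipped" : Int)),
       ("would_create", d + ((l.map pvAct).count "would-create" : Int)),
       ("would_update", e + ((l.map pvAct).count "would-update" : Int)),
       ("would_skip", f + ((l.map pvAct).count "would-skip" : Int))] := by
  induction l generalizing t a b c d e f with
  | nil => simp
  | cons x xs ih =>
    rw [List.foldl_cons, pvStepA_eq, ih]
    simp only [List.map_cons, List.count_cons, beq_iff_eq, List.cons.injEq, Prod.mk.injEq]
    refine ⟨True.intro, ⟨True.intro, ?_⟩, ⟨True.intro, ?_⟩, ⟨True.intro, ?_⟩, ⟨True.intro, ?_⟩,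
      ⟨True.intro, ?_⟩, ⟨True.intro, ?_⟩, True.intro⟩ <;> (push_cast; split_ifs <;> omega)

-- ===== VERDICT (by name: the statement is the Claim_ definition above) =====
theorem summarize_materialized_issue_actions_py_spec : Claim_equal_summarize_materialized_issue_actions_py := by
  intro mi _
  unfold Spec_summarize_materialized_issue_actions_py
  rw [pvPortA_eq, pvFoldA]
  unfold summarize_materialized_issue_actions_py_alt
  simp only [List.foldl_cons, List.foldl_nil]
  simp [PySem.Dict.insert, PySem.List.count]
  exact ⟨rfl, rfl, rfl, rfl, rfl, rfl⟩
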